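-- pv_equiv track=rewrite | github.com/JinYosh/Coding-practice | Random practice/min moves to reduce the word.py | solve
-- ===== SOURCE A (Python) =====
-- def solve(A):
--     dic_ = {}
--     for c in A:
--         if c not in dic_.keys():
--             dic_[c] = 1
--         else:
--             dic_[c] += 1
--     min_moves = 0
--     for k in dic_.keys():
--         freq_ = dic_[k]
--         reduced = freq_ // 2
--         min_moves += reduced
--     return min_moves
-- ===== SOURCE B (Python) =====
-- def solve(A):
--     odd = set()
--     for c in A:
--         if c in odd:
--             odd.discard(c)
--         else:
--             odd.add(c)
--     return (len(A) - len(odd)) // 2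
-- ===== Notes on version B (the rewrite author's own statement) =====
-- stated objective: simpler
-- what changed: Replaces the frequency dictionary and the second summation pass over its keys by a single pass maintaining only a parity set, returning (len(A) - #odd-frequency chars) // 2 via the identity sum(freq//2) = (total - #odd)/2; constant-factor win from dropping the dict and the second pass.
import Mathlib
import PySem

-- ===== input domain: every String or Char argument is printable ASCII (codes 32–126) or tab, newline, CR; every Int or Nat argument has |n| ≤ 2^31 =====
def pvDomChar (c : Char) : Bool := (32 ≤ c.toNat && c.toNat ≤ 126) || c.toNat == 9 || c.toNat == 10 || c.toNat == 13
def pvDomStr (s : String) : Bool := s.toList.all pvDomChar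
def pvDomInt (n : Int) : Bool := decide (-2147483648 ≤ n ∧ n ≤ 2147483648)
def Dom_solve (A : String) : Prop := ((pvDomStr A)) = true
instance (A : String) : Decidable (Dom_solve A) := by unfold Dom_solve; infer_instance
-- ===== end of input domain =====

-- B replaces the frequency dict + summation of freq//2 by a single parity-set pass,
-- returning (len(A) - #odd-frequency chars) // 2; objective: simpler (same O(n) cost).

-- ===== PORT A =====
def pvStepA (d : PySem.Dict Char Int) (c : Char) : PySem.Dict Char Int :=
  if d.contains c = false then d.insert c 1 else d.modify c 0 (· + 1)

def solve (A : String) : Int :=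
  let dic := A.toList.foldl pvStepA PySem.Dict.empty
  dic.keys.foldl (fun m k => m + PySem.Int.floordiv (dic.getD k 0) 2) 0

-- ===== PORT B =====
def pvStepB (s : PySem.Set Char) (c : Char) : PySem.Set Char :=
  if PySem.Set.contains s c then PySem.Set.discard s c else PySem.Set.add s c

def solve_alt (A : String) : Int :=
  let odd := A.toList.foldl pvStepB PySem.Set.empty
  PySem.Int.floordiv (PySem.Str.len A - PySem.Set.len odd) 2

-- ===== PRECONDITION & SPEC =====
def Spec_solve (A : String) (out : Int) : Prop := out = solve_alt A
instance (A : String) (out : Int) : Decidable (Spec_solve A out) := by unfold Spec_solve; infer_instance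

-- ===== CLAIM (what is proved, stated in full; the proofs are below) =====
def Claim_equal_solve : Prop := ∀ (A : String), Dom_solve A → Spec_solve A (solve A)

-- ===== LEMMAS AND PROOFS =====

-- A's insertion branch is the Counter step when the key is absent
lemma pvModify_not_contains (d : PySem.Dict Char Int) (c : Char) (h : d.contains c = false) :
    d.modify c 0 (· + 1) = d.insert c 1 := by
  have h2 : d.get? c = none := by
    rw [PySem.Dict.get?_eq_none_iff_contains]; simp [h]
  simp [PySem.Dict.modify, PySem.Dict.insert, PySem.Dict.getD, h, h2]

-- A's dict-building loop is Counter(l)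
lemma pvBuild_eq_counter (l : List Char) :
    l.foldl pvStepA PySem.Dict.empty = PySem.Dict.counter l := by
  rw [PySem.Dict.counter_eq_foldl]
  have : pvStepA = (fun d x => d.modify x 0 (· + 1)) := by
    funext d c
    by_cases h : d.contains c = true
    · simp [pvStepA, h]
    · have hf : d.contains c = false := by simpa using h
      simp [pvStepA, hf, pvModify_not_contains d c hf]
  rw [this]

-- the halving identity, over any key list
lemma pvHalf_sum (K : List Char) (f : Char → Nat) :
    2 * (K.map (fun k => f k / 2)).sum
      + (K.filter (fun k => f k % 2 == 1)).length = (K.map f).sum := by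
  induction K with
  | nil => simp
  | cons x K ih =>
    by_cases h : f x % 2 = 1 <;>
      simp [h, Nat.mul_add] <;> omega

-- B's parity loop: membership in the set ↔ odd count so far
lemma pvParity (l : List Char) : ∀ (s : List Char), s.Nodup →
    (l.foldl pvStepB s).Nodup ∧
      ∀ c, c ∈ l.foldl pvStepB s ↔
        (l.count c + (if c ∈ s then 1 else 0)) % 2 = 1 := by
  induction l with
  | nil =>
    intro s hs
    refine ⟨hs, fun c => ?_⟩
    by_cases h : c ∈ s <;> simp [h]
  | cons x l ih =>
    intro s hs
    have hstep : (pvStepB s x).Nodup := by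
      unfold pvStepB
      split
      · exact PySem.Set.nodup_discard _ _ hs
      · exact PySem.Set.nodup_add _ _ hs
    obtain ⟨hnd, hmem⟩ := ih (pvStepB s x) hstep
    refine ⟨by simpa using hnd, fun c => ?_⟩
    have hms : ∀ c', c' ∈ pvStepB s x ↔ ((c' ∈ s) ≠ (c' = x)) := by
      intro c'
      by_cases hx : x ∈ s
      · simp only [pvStepB]
        by_cases h1 : c' = x <;> by_cases h2 : c' ∈ s <;> simp_all
      · simp only [pvStepB]
        by_cases h1 : c' = x <;> by_cases h2 : c' ∈ s <;> simp_all
    simp only [List.foldl_cons, hmem c, hms c, List.count_cons]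
    by_cases h1 : c = x
    · subst h1
      by_cases h2 : c ∈ s <;> (simp [h2]; try omega)
    · have h1' : ¬ (x = c) := fun h => h1 h.symm
      by_cases h2 : c ∈ s <;> simp [h1, h1', h2]

-- the parity set at the end collects exactly the odd-count characters of l
lemma pvParity_length (l : List Char) :
    (l.foldl pvStepB PySem.Set.empty).length
      = ((PySem.Set.ofList l).filter (fun k => l.count k % 2 == 1)).length := by
  rw [show (PySem.Set.empty : List Char) = [] from rfl]
  obtain ⟨hnd, hmem⟩ := pvParity l [] List.nodup_nil
  have hF : ((PySem.Set.ofList l).filter (fun k => l.count k % 2 == 1)).Nodup :=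
    (PySem.Set.nodup_ofList l).filter _
  have hperm : (l.foldl pvStepB ([] : List Char)).Perm
      ((PySem.Set.ofList l).filter (fun k => l.count k % 2 == 1)) := by
    rw [List.perm_ext_iff_of_nodup hnd hF]
    intro c
    rw [List.mem_filter, PySem.Set.mem_ofList]
    have hthis : c ∈ List.foldl pvStepB ([] : List Char) l ↔ l.count c % 2 = 1 := by
      simpa using hmem c
    rw [hthis]
    constructor
    · intro h
      exact ⟨List.count_pos_iff.mp (by omega), by simpa using h⟩
    · intro h; simpa using h.2
  exact hperm.length_eq

-- sum of counts over the distinct characters is the length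
lemma pvSum_counts (l : List Char) :
    ((PySem.Set.ofList l).map (fun k => l.count k)).sum = l.length := by
  have hperm : (PySem.Set.ofList l).Perm l.dedup := by
    rw [List.perm_ext_iff_of_nodup (PySem.Set.nodup_ofList l) l.nodup_dedup]
    intro c; rw [PySem.Set.mem_ofList, List.mem_dedup]
  calc ((PySem.Set.ofList l).map (fun k => l.count k)).sum
      = (l.dedup.map (fun k => l.count k)).sum := (hperm.map _).sum_eq
    _ = l.length := l.sum_map_count_dedup_eq_length

-- ===== VERDICT (by name: the statement is the Claim_ definition above) =====
theorem solve_spec : Claim_equal_solve := by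
  intro A _
  unfold Spec_solve solve solve_alt
  set l := A.toList with hl
  simp only [pvBuild_eq_counter, PySem.Dict.keys_counter]
  rw [PySem.List.foldl_add]
  have hmap : (PySem.Set.ofList l).map
        (fun k => PySem.Int.floordiv ((PySem.Dict.counter l).getD k 0) 2)
      = (PySem.Set.ofList l).map (fun k => ((l.count k / 2 : Nat) : Int)) := by
    refine List.map_congr_left (fun k _ => ?_)
    rw [PySem.Dict.getD_counter]
    exact_mod_cast PySem.Int.floordiv_natCast (l.count k) 2
  rw [hmap]
  set H : Nat := ((PySem.Set.ofList l).map (fun k => l.count k / 2)).sum with hH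
  set F : Nat := ((PySem.Set.ofList l).filter (fun k => l.count k % 2 == 1)).length with hF
  have hsum : 2 * H + F = l.length := by
    rw [hH, hF, ← pvSum_counts l]; exact pvHalf_sum _ _
  have hlhs : ((PySem.Set.ofList l).map (fun k => ((l.count k / 2 : Nat) : Int))).sum
      = (H : Int) := by
    rw [hH, show (fun k : Char => ((l.count k / 2 : Nat) : Int))
        = (fun n : Nat => (n : Int)) ∘ (fun k : Char => l.count k / 2) from rfl,
      ← List.map_map]
    exact (Nat.cast_list_sum _).symm
  rw [hlhs]
  have hlen : PySem.Str.len A = (l.length : Int) := by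
    simp [PySem.Str.len, hl]
  have hodd : PySem.Set.len (l.foldl pvStepB PySem.Set.empty) = (F : Int) := by
    simp only [PySem.Set.len]
    rw [pvParity_length l, hF]
  rw [hlen, hodd]
  have hnum : (l.length : Int) - (F : Int) = ((2 * H : Nat) : Int) := by
    push_cast; omega
  rw [hnum]
  have : PySem.Int.floordiv ((2 * H : Nat) : Int) 2 = ((2 * H / 2 : Nat) : Int) := by
    exact_mod_cast PySem.Int.floordiv_natCast (2 * H) 2
  rw [this]
  have : 2 * H / 2 = H := by omega
  rw [this]
  ring
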